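-- pv_equiv track=rewrite | github.com/YueXiao1995/algorithm | LeetCode-Python/1578 Minimum Deletion Cost to Avoid Repeating Letters.py | minCost2
-- ===== SOURCE A (Python) =====
-- def minCost2(s, cost):
--     s = str(s)
--     min_total_cost = 0
--     cost_list = [cost[0]]
--     for i in range(1, len(s)):
--         if s[i] == s[i - 1]:
--             cost_list.append(cost[i])
--         else:
--             if len(cost_list) != 1:
--                 min_total_cost += sum(cost_list) - max(cost_list)
--
--             cost_list = [cost[i]]
--
--     if len(cost_list) != 1:
--         min_total_cost += sum(cost_list) - max(cost_list)
--     return min_total_cost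
-- ===== SOURCE B (Python) =====
-- def minCost2(s, cost):
--     s = str(s)
--     total = 0
--     maxc = cost[0]
--     for i in range(1, len(s)):
--         if s[i] == s[i - 1]:
--             total += min(maxc, cost[i])
--             maxc = max(maxc, cost[i])
--         else:
--             maxc = cost[i]
--     return total
-- ===== Notes on version B (the rewrite author's own statement) =====
-- stated objective: simpler
-- what changed: B replaces A's materialized run-list with per-boundary sum-minus-max settlement by a single running maximum: within a run it adds min(running max, cost[i]) immediately and updates the max, never building a list and never summing one.
import Mathlib
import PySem

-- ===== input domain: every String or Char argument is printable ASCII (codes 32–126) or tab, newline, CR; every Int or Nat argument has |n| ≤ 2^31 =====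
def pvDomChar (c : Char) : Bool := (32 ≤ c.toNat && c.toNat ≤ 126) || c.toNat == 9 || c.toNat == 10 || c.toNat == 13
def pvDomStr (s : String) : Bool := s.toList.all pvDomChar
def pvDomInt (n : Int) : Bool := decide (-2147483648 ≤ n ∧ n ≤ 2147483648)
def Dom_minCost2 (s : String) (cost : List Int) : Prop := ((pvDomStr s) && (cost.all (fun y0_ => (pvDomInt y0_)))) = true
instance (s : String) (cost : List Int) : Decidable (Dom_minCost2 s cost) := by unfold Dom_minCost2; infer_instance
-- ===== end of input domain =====

-- B replaces A's materialized run-list (settled with sum-minus-max at run boundaries) by an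
-- incremental running maximum that charges min(running max, cost[i]) at each repeat; equal return values.

-- ===== PORT A =====
-- Python max(nonempty list): fold of max over the list (cost_list is always nonempty in A).
def pyMax (l : List Int) : Int :=
  match l with
  | [] => 0
  | x :: xs => xs.foldl max x

-- one iteration of A's loop body, state = (min_total_cost, cost_list)
def stepA (cs : List Char) (cost : List Int) (st : Int × List Int) (i : Int) : Int × List Int :=
  if PySem.List.pyGetD cs i ' ' = PySem.List.pyGetD cs (i - 1) ' ' then
    (st.1, st.2 ++ [PySem.List.pyGetD cost i 0])
  else
    (if st.2.length ≠ 1 then st.1 + st.2.sum - pyMax st.2 else st.1,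
     [PySem.List.pyGetD cost i 0])

def minCost2 (s : String) (cost : List Int) : Int :=
  let cs := s.toList
  let r := (PySem.List.pyRange 1 cs.length 1).foldl (stepA cs cost)
             (0, [PySem.List.pyGetD cost 0 0])
  if r.2.length ≠ 1 then r.1 + r.2.sum - pyMax r.2 else r.1

-- ===== PORT B =====
-- one iteration of B's loop body, state = (total, maxc)
def stepB (cs : List Char) (cost : List Int) (st : Int × Int) (i : Int) : Int × Int :=
  if PySem.List.pyGetD cs i ' ' = PySem.List.pyGetD cs (i - 1) ' ' then
    (st.1 + min st.2 (PySem.List.pyGetD cost i 0), max st.2 (PySem.List.pyGetD cost i 0))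
  else
    (st.1, PySem.List.pyGetD cost i 0)

def minCost2_alt (s : String) (cost : List Int) : Int :=
  let cs := s.toList
  ((PySem.List.pyRange 1 cs.length 1).foldl (stepB cs cost)
     (0, PySem.List.pyGetD cost 0 0)).1

-- ===== PRECONDITION & SPEC =====
-- A raises IndexError on cost[0] when cost is empty and on cost[i] when cost is shorter than s;
-- Pre_ admits exactly the inputs where every cost index A touches exists.
def Pre_minCost2 (s : String) (cost : List Int) : Prop :=
  cost ≠ [] ∧ s.toList.length ≤ cost.length
instance (s : String) (cost : List Int) : Decidable (Pre_minCost2 s cost) := by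
  unfold Pre_minCost2; infer_instance

def pvWitness_minCost2 : String × List Int := ("abaac", [1, 2, 3, 4, 5])

def Spec_minCost2 (s : String) (cost : List Int) (out : Int) : Prop := out = minCost2_alt s cost
instance (s : String) (cost : List Int) (out : Int) : Decidable (Spec_minCost2 s cost out) := by
  unfold Spec_minCost2; infer_instance

-- ===== CLAIM (what is proved, stated in full; the proofs are below) =====
def Claim_equal_minCost2 : Prop := ∀ (s : String) (cost : List Int), Dom_minCost2 s cost → Pre_minCost2 s cost → Spec_minCost2 s cost (minCost2 s cost)

-- ===== LEMMAS AND PROOFS =====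

lemma pyMax_append_singleton (x : Int) (xs : List Int) (c : Int) :
    pyMax ((x :: xs) ++ [c]) = max (pyMax (x :: xs)) c := by
  simp [pyMax, List.foldl_append]

-- A singleton run settles to zero, so A's length-1 guard is value-irrelevant.
lemma settle_eq (t : Int) (cl : List Int) (h : cl ≠ []) :
    (if cl.length ≠ 1 then t + cl.sum - pyMax cl else t) = t + cl.sum - pyMax cl := by
  match cl, h with
  | [x], _ => simp [pyMax]
  | x :: y :: xs, _ => simp

-- Loop invariant: B's state is A's run settled into the total, plus the run's max.
lemma fold_invariant (cs : List Char) (cost : List Int) (l : List Int) :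
    ∀ (tA : Int) (cl : List Int) (tB m : Int), cl ≠ [] →
      tB = tA + cl.sum - pyMax cl → m = pyMax cl →
      (l.foldl (stepB cs cost) (tB, m)).1 =
        (let r := l.foldl (stepA cs cost) (tA, cl)
         if r.2.length ≠ 1 then r.1 + r.2.sum - pyMax r.2 else r.1) := by
  induction l with
  | nil =>
      intro tA cl tB m h h2 h3
      simp [settle_eq _ _ h, h2]
  | cons i l ih =>
      intro tA cl tB m h h2 h3
      simp only [List.foldl_cons]
      by_cases hc : PySem.List.pyGetD cs i ' ' = PySem.List.pyGetD cs (i - 1) ' '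
      · -- repeat: A appends to the run, B settles min and bumps the max
        obtain ⟨x, xs, rfl⟩ := List.exists_cons_of_ne_nil h
        rw [show stepB cs cost (tB, m) i
              = (tB + min m (PySem.List.pyGetD cost i 0), max m (PySem.List.pyGetD cost i 0)) by
            simp [stepB, hc],
           show stepA cs cost (tA, x :: xs) i
              = (tA, (x :: xs) ++ [PySem.List.pyGetD cost i 0]) by simp [stepA, hc]]
        apply ih
        · simp
        · rw [pyMax_append_singleton]
          have := min_add_max m (PySem.List.pyGetD cost i 0)
          simp [h2, h3] at *
          omega
        · rw [pyMax_append_singleton, h3]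
      · -- boundary: A settles the run and restarts; B resets the max
        rw [show stepB cs cost (tB, m) i = (tB, PySem.List.pyGetD cost i 0) by simp [stepB, hc],
           show stepA cs cost (tA, cl) i
              = (if cl.length ≠ 1 then tA + cl.sum - pyMax cl else tA, [PySem.List.pyGetD cost i 0]) by
            simp [stepA, hc]]
        apply ih
        · simp
        · rw [settle_eq _ _ h, h2]; simp [pyMax]
        · simp [pyMax]

-- ===== VERDICT (by name: the statement is the Claim_ definition above) =====
theorem minCost2_spec : Claim_equal_minCost2 := by
  intro s cost _ _
  unfold Spec_minCost2 minCost2 minCost2_alt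
  exact (fold_invariant s.toList cost _ 0 [PySem.List.pyGetD cost 0 0] 0
    (PySem.List.pyGetD cost 0 0) (by simp) (by simp [pyMax]) (by simp [pyMax])).symm
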